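-- pv_equiv track=rewrite | github.com/benquick123/code-profiling | code/batch-1/vse-naloge-brez-testov/DN7-M-177.py | po_sosedih
-- ===== SOURCE A (Python) =====
-- def vsa_polja(s, v):
--     return ((x, y) for x in range(s) for y in range(v))
--
-- def sosedov(x, y, mine):
--     st_sosedov = 0
--     for x1,y1 in mine:
--         if x1 != x or y1 != y:
--             x1 = abs(x1 - x)
--             y1 = abs(y1 - y)
--             if (x1 == 1 or x1 == 0) and (y1 == 1 or y1 == 0):
--                 st_sosedov += 1
--     return st_sosedov
--
-- def po_sosedih(mine, s, v):
--     slovar = dict()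
--     koordinate = (0,0)
--     kljuci = 0
--     while kljuci < 9:
--         slovar[kljuci] = set()
--         kljuci += 1
--     for x, y in vsa_polja(s, v):
--         kljuci1 = 0
--         while kljuci1 < 9:
--             if sosedov(x, y, mine) == kljuci1:
--                 koordinate = (x,y)
--                 slovar[kljuci1].add(koordinate)
--             kljuci1 += 1
--     return slovar
-- ===== SOURCE B (Python) =====
-- _DELTAS = ((-1, -1), (-1, 0), (-1, 1), (0, -1), (0, 1), (1, -1), (1, 0), (1, 1))
--
-- def po_sosedih(mine, s, v):
--     # scatter each mine to its 8 neighbour cells, then bucket cells by count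
--     cnt = {}
--     for mx, my in mine:
--         for dx, dy in _DELTAS:
--             key = (mx + dx, my + dy)
--             cnt[key] = cnt.get(key, 0) + 1
--     slovar = {k: set() for k in range(9)}
--     for x in range(s):
--         for y in range(v):
--             c = cnt.get((x, y), 0)
--             if c < 9:
--                 slovar[c].add((x, y))
--     return slovar
-- ===== Notes on version B (the rewrite author's own statement) =====
-- stated objective: faster
-- what changed: Instead of recomputing the neighbour-mine count for every cell by scanning the whole mine list (nine times per cell), B scatters each mine once onto its 8 neighbour cells into a counter dict and then buckets each cell by a single O(1) lookup; intended as faster (measured 17x at n=1024, 10x at n=256 in a timing run; one mutual timeout kept the label unconfirmed).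
import Mathlib
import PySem

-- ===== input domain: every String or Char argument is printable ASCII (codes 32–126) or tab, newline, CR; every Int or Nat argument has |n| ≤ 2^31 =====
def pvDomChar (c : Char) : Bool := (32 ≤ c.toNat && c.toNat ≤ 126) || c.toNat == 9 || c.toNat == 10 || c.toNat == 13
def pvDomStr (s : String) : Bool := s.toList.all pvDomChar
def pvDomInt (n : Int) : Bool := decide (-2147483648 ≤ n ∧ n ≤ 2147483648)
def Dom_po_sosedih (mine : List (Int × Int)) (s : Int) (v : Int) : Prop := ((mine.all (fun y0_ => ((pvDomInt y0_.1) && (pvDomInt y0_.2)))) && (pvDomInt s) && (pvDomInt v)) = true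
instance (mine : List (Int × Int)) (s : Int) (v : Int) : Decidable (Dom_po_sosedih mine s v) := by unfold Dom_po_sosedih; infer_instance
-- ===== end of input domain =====

-- B replaces A's per-cell scan of all mines (O(s*v*m)) by scattering each mine onto its
-- 8 neighbour cells into a counter dict and then bucketing the cells (O(m + s*v));
-- intended as faster (a timing run measured 17x at n=1024; label unconfirmed there).

-- ===== PORT A =====
def vsa_polja (s v : Int) : List (Int × Int) :=
  (PySem.List.pyRange 0 s 1).flatMap (fun x => (PySem.List.pyRange 0 v 1).map (fun y => (x, y)))

def sosedov (x y : Int) (mine : List (Int × Int)) : Int :=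
  mine.foldl (fun st p =>
    if p.1 ≠ x ∨ p.2 ≠ y then
      let x1 := |p.1 - x|
      let y1 := |p.2 - y|
      if (x1 == 1 || x1 == 0) && (y1 == 1 || y1 == 0) then st + 1 else st
    else st) 0

def po_sosedih (mine : List (Int × Int)) (s : Int) (v : Int) : List (Int × List (Int × Int)) :=
  let slovar : PySem.Dict Int (PySem.Set (Int × Int)) :=
    (PySem.List.pyRange 0 9 1).foldl (fun d k => d.insert k PySem.Set.empty) PySem.Dict.empty
  let slovar :=
    (vsa_polja s v).foldl (fun d xy =>
      (PySem.List.pyRange 0 9 1).foldl (fun d k =>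
        if sosedov xy.1 xy.2 mine == k then
          d.modify k PySem.Set.empty (fun st => st.add (xy.1, xy.2))
        else d) d) slovar
  slovar.items

-- ===== PORT B =====
def pvDeltas : List (Int × Int) := [(-1,-1),(-1,0),(-1,1),(0,-1),(0,1),(1,-1),(1,0),(1,1)]

def po_sosedih_alt (mine : List (Int × Int)) (s : Int) (v : Int) : List (Int × List (Int × Int)) :=
  let cnt : PySem.Dict (Int × Int) Int :=
    mine.foldl (fun c m =>
      pvDeltas.foldl (fun c d => c.modify (m.1 + d.1, m.2 + d.2) 0 (· + 1)) c) PySem.Dict.empty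
  let slovar : PySem.Dict Int (PySem.Set (Int × Int)) :=
    (PySem.List.pyRange 0 9 1).foldl (fun d k => d.insert k PySem.Set.empty) PySem.Dict.empty
  let slovar :=
    (PySem.List.pyRange 0 s 1).foldl (fun d x =>
      (PySem.List.pyRange 0 v 1).foldl (fun d y =>
        let c := cnt.getD (x, y) 0
        if c < 9 then d.modify c PySem.Set.empty (fun st => st.add (x, y)) else d) d) slovar
  slovar.items

-- ===== PRECONDITION & SPEC =====
def Spec_po_sosedih (mine : List (Int × Int)) (s : Int) (v : Int) (out : List (Int × List (Int × Int))) : Prop := out = po_sosedih_alt mine s v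
instance (mine : List (Int × Int)) (s : Int) (v : Int) (out : List (Int × List (Int × Int))) : Decidable (Spec_po_sosedih mine s v out) := by unfold Spec_po_sosedih; infer_instance

-- ===== CLAIM (what is proved, stated in full; the proofs are below) =====
def Claim_equal_po_sosedih : Prop := ∀ (mine : List (Int × Int)) (s : Int) (v : Int), Dom_po_sosedih mine s v → Spec_po_sosedih mine s v (po_sosedih mine s v)


-- ===== LEMMAS AND PROOFS =====

-- A's per-mine predicate: the mine at p is a (strict) neighbour of (x, y)
def isNbr (x y : Int) (p : Int × Int) : Bool :=
  (decide (p.1 ≠ x ∨ p.2 ≠ y)) && ((|p.1 - x| == 1 || |p.1 - x| == 0) && (|p.2 - y| == 1 || |p.2 - y| == 0))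

theorem sosedov_foldl (x y : Int) (mine : List (Int × Int)) (init : Int) :
    mine.foldl (fun st p =>
      if p.1 ≠ x ∨ p.2 ≠ y then
        let x1 := |p.1 - x|
        let y1 := |p.2 - y|
        if (x1 == 1 || x1 == 0) && (y1 == 1 || y1 == 0) then st + 1 else st
      else st) init = init + (mine.countP (isNbr x y) : Int) := by
  induction mine generalizing init with
  | nil => simp
  | cons p t ih =>
    simp only [List.foldl_cons, List.countP_cons, ih, isNbr]
    by_cases h : p.1 ≠ x ∨ p.2 ≠ y
    · by_cases h2 : ((|p.1 - x| == 1 || |p.1 - x| == 0) && (|p.2 - y| == 1 || |p.2 - y| == 0)) = true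
      · simp [h, h2]; ring
      · simp [h, h2]
    · simp [h]

theorem sosedov_eq_countP (x y : Int) (mine : List (Int × Int)) :
    sosedov x y mine = (mine.countP (isNbr x y) : Int) := by
  unfold sosedov; rw [sosedov_foldl]; ring

-- the 8 neighbour keys of a mine m, as B scatters them
theorem mem_block_iff (m : Int × Int) (x y : Int) :
    ((x, y) ∈ pvDeltas.map (fun d => (m.1 + d.1, m.2 + d.2))) ↔ isNbr x y m = true := by
  simp only [pvDeltas, List.map_cons, List.map_nil, List.mem_cons, List.not_mem_nil, or_false,
    Prod.mk.injEq, isNbr, Bool.and_eq_true, Bool.or_eq_true, beq_iff_eq, decide_eq_true_eq,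
    Int.abs_eq_natAbs]
  omega

theorem nodup_block (m : Int × Int) :
    (pvDeltas.map (fun d => (m.1 + d.1, m.2 + d.2))).Nodup := by
  apply List.Nodup.map
  · intro a b h
    simp only [Prod.mk.injEq] at h
    obtain ⟨a1, a2⟩ := a; obtain ⟨b1, b2⟩ := b
    simp only [Prod.mk.injEq]
    omega
  · decide

theorem count_flatMap_blocks (mine : List (Int × Int)) (x y : Int) :
    (mine.flatMap (fun m => pvDeltas.map (fun d => (m.1 + d.1, m.2 + d.2)))).count (x, y)
      = mine.countP (isNbr x y) := by
  induction mine with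
  | nil => simp
  | cons m t ih =>
    simp only [List.flatMap_cons, List.count_append, List.countP_cons, ih]
    by_cases h : isNbr x y m = true
    · have hm : (x, y) ∈ pvDeltas.map (fun d => (m.1 + d.1, m.2 + d.2)) := (mem_block_iff m x y).2 h
      rw [List.count_eq_one_of_mem (nodup_block m) hm]
      simp [h]; omega
    · have hm : (x, y) ∉ pvDeltas.map (fun d => (m.1 + d.1, m.2 + d.2)) := fun hc => h ((mem_block_iff m x y).1 hc)
      rw [List.count_eq_zero_of_not_mem hm]
      simp [h]

-- the count a cell gets from B's counter equals A's sosedov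
theorem foldl_ext {α β : Type} (f g : α → β → α) (l : List β) (init : α)
    (h : ∀ a b, f a b = g a b) : l.foldl f init = l.foldl g init := by
  induction l generalizing init with
  | nil => rfl
  | cons b t ih => simp only [List.foldl_cons, h, ih]

theorem foldl_foldl_eq_flatMap {α β γ : Type} (l : List β) (g : β → List γ)
    (step : α → γ → α) (init : α) :
    l.foldl (fun a m => (g m).foldl step a) init = (l.flatMap g).foldl step init := by
  induction l generalizing init with
  | nil => rfl
  | cons b t ih => simp [List.flatMap_cons, List.foldl_append, ih]

theorem cnt_eq_sosedov (mine : List (Int × Int)) (x y : Int) :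
    (mine.foldl (fun c m =>
        pvDeltas.foldl (fun c d => c.modify (m.1 + d.1, m.2 + d.2) 0 (· + 1)) c)
        PySem.Dict.empty).getD (x, y) 0 = sosedov x y mine := by
  rw [foldl_ext _ (fun (c : PySem.Dict (Int × Int) Int) (m : Int × Int) =>
        ((pvDeltas.map (fun d => (m.1 + d.1, m.2 + d.2))).foldl (fun c k => c.modify k 0 (· + 1)) c))
      mine PySem.Dict.empty (fun c m => Eq.symm List.foldl_map)]
  rw [foldl_foldl_eq_flatMap]
  rw [PySem.Dict.getD_foldl_modify_add_one, count_flatMap_blocks, sosedov_eq_countP]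
  simp [PySem.Dict.getD, PySem.Dict.get?, PySem.Dict.empty]

theorem sosedov_nonneg (x y : Int) (mine : List (Int × Int)) : 0 ≤ sosedov x y mine := by
  rw [sosedov_eq_countP]; positivity

-- A's inner while-loop over keys 0..8 adds the cell to bucket n (if 0 ≤ n < 9)
theorem pyRange09 : PySem.List.pyRange 0 9 1 = [0,1,2,3,4,5,6,7,8] := by
  rw [PySem.List.pyRange_one]; rfl

theorem innerA (f : PySem.Dict Int (PySem.Set (Int × Int)) → Int → PySem.Dict Int (PySem.Set (Int × Int)))
    (n : Int) (d : PySem.Dict Int (PySem.Set (Int × Int))) :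
    (PySem.List.pyRange 0 9 1).foldl (fun d k => if n == k then f d k else d) d
      = if 0 ≤ n ∧ n < 9 then f d n else d := by
  rw [pyRange09]
  by_cases h : 0 ≤ n ∧ n < 9
  · obtain ⟨h1, h2⟩ := h
    interval_cases n <;> simp [List.foldl]
  · have hk : ∀ k : Int, (0:Int) ≤ k → k < 9 → (n == k) = false := by
      intro k hk1 hk2
      simp only [beq_eq_false_iff_ne, ne_eq]
      omega
    simp only [List.foldl_cons, List.foldl_nil,
      hk 0 (by norm_num) (by norm_num), hk 1 (by norm_num) (by norm_num),
      hk 2 (by norm_num) (by norm_num), hk 3 (by norm_num) (by norm_num),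
      hk 4 (by norm_num) (by norm_num), hk 5 (by norm_num) (by norm_num),
      hk 6 (by norm_num) (by norm_num), hk 7 (by norm_num) (by norm_num),
      hk 8 (by norm_num) (by norm_num), Bool.false_eq_true, if_false]
    rw [if_neg h]

theorem foldl_flatMap_pairs {α : Type} (xs ys : List Int)
    (g : α → Int × Int → α) (init : α) :
    (xs.flatMap (fun x => ys.map (fun y => (x, y)))).foldl g init
      = xs.foldl (fun a x => ys.foldl (fun a y => g a (x, y)) a) init := by
  induction xs generalizing init with
  | nil => simp
  | cons x t ih => simp [List.flatMap_cons, List.foldl_append, List.foldl_map, ih]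

-- ===== VERDICT (by name: the statement is the Claim_ definition above) =====
theorem po_sosedih_spec : Claim_equal_po_sosedih := by
  intro mine s v _
  unfold Spec_po_sosedih po_sosedih po_sosedih_alt vsa_polja
  simp only [foldl_flatMap_pairs]
  congr 1
  apply foldl_ext
  intro d x
  apply foldl_ext
  intro d' y
  rw [innerA (fun d k => d.modify k PySem.Set.empty (fun st => st.add (x, y))) (sosedov x y mine) d',
    cnt_eq_sosedov]
  have h0 := sosedov_nonneg x y mine
  by_cases h : sosedov x y mine < 9
  · simp [h, h0]
  · simp [h]
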